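-- pv_equiv track=rewrite | github.com/tiltshiftnl/fixxx-looplijsten-backend | app/api/planner/utils.py | shorten_if_necessary
-- ===== SOURCE A (Python) =====
-- def shorten_if_necessary(cases, length_target):
--     '''
--     Shorten the given list using the length_target as cutoff index
--     Cutoff is increased when two or more cases share the same address
--     '''
--     # Set the initial cutoff index to length_target
--     cutoff_index = length_target
--
--     # Sort by address similarity (street number & street name)
--     sorted_cases = cases.copy()
--     sorted_cases = sorted(sorted_cases, key=lambda case: case.get('street_number'))
--     sorted_cases = sorted(sorted_cases, key=lambda case: case.get('street_name'))
--
--     # Increment the cutoff if two following items share the same adress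
--     for index, case in enumerate(sorted_cases):
--         if index + 1 == len(sorted_cases):
--             break
--
--         next_case = sorted_cases[index + 1]
--         same_street = case.get('street_name') == next_case.get('street_name')
--         same_number = case.get('street_number') == next_case.get('street_number')
--
--         if same_street and same_number:
--             cutoff_index += 1
--
--     shortened_list = sorted_cases[:cutoff_index]
--     return shortened_list
-- ===== SOURCE B (Python) =====
-- def shorten_if_necessary(cases, length_target):
--     '''
--     Shorten the given list using the length_target as cutoff index
--     Cutoff is increased when two or more cases share the same address
--     '''
--     # Same two-key stable sort as before (street number, then street name)
--     sorted_cases = sorted(cases, key=lambda case: case.get('street_number'))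
--     sorted_cases = sorted(sorted_cases, key=lambda case: case.get('street_name'))
--
--     # Each address occurring k times contributes k - 1 adjacent duplicates in
--     # the sorted list, so the total increment is len(cases) - number of
--     # distinct addresses.
--     distinct_addresses = {
--         (case.get('street_name'), case.get('street_number'))
--         for case in sorted_cases
--     }
--     cutoff_index = length_target + len(sorted_cases) - len(distinct_addresses)
--
--     return sorted_cases[:cutoff_index]
-- ===== Notes on version B (the rewrite author's own statement) =====
-- stated objective: simpler
-- what changed: The adjacency loop over enumerate/index lookups is removed: B keeps the identical two-key sort and computes the cutoff arithmetically as length_target + len(cases) - number of distinct (street_name, street_number) tuples, using the identity that adjacent duplicates in the sorted list equal n minus the distinct-address count.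
import Mathlib
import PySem

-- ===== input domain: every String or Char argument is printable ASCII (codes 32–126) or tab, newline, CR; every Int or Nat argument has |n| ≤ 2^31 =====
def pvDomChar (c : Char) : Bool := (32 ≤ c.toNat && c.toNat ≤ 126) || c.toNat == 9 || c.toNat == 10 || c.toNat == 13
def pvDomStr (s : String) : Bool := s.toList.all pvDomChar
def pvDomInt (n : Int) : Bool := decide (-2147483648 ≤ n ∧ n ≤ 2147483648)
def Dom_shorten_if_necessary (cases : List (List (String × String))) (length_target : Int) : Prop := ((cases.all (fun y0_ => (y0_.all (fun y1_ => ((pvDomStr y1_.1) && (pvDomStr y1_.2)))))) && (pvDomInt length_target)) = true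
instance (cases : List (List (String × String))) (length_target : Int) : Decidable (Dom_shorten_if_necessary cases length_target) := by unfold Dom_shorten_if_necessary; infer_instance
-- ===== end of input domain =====

-- B removes A's adjacency loop: it keeps the identical two-key sort and computes the
-- cutoff as length_target + len - number of distinct (street_name, street_number)
-- tuples (objective: simpler).  Return-value equivalence; neither version mutates its input.


-- ===== PORT A =====
-- Sort keys: Python's key is case.get('street_…'), possibly None.  Comparing None raises
-- TypeError, so under Pre_ every compared key is a string and the String-valued key
-- `(Dict.mk case).getD "street_…" ""` is exact; for lists of length ≤ 1 the sort performs
-- no comparison, so the key value is irrelevant there.  The loop's `break` fires only at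
-- the final index, so it is ported as 'skip on the last iteration'; the pyGetD default []
-- sits outside the guard `index + 1 = len` and is never used.
def shorten_if_necessary (cases : List (List (String × String))) (length_target : Int) : List (List (String × String)) :=
  let cutoff_index : Int := length_target
  let sorted_cases := cases  -- cases.copy(): same value, no shared mutation modelled
  let sorted_cases := PySem.List.sorted sorted_cases (fun case => (PySem.Dict.mk case).getD "street_number" "")
  let sorted_cases := PySem.List.sorted sorted_cases (fun case => (PySem.Dict.mk case).getD "street_name" "")
  let cutoff_index := (PySem.List.enumerate sorted_cases).foldl (fun cutoff_index ic =>
    if ic.1 + 1 = (sorted_cases.length : Int) then cutoff_index  -- break (last iteration)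
    else
      let next_case := PySem.List.pyGetD sorted_cases (ic.1 + 1) []
      let same_street := (PySem.Dict.mk ic.2).get? "street_name" == (PySem.Dict.mk next_case).get? "street_name"
      let same_number := (PySem.Dict.mk ic.2).get? "street_number" == (PySem.Dict.mk next_case).get? "street_number"
      if same_street && same_number then cutoff_index + 1 else cutoff_index) cutoff_index
  let shortened_list := PySem.List.slice sorted_cases none (some cutoff_index)
  shortened_list

-- ===== PORT B =====
-- Same two sorts (same key caveat as in port A); the set comprehension becomes
-- PySem.Set.ofList of the mapped tuples, consumed only through its length.
def shorten_if_necessary_alt (cases : List (List (String × String))) (length_target : Int) : List (List (String × String)) :=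
  let sorted_cases := PySem.List.sorted cases (fun case => (PySem.Dict.mk case).getD "street_number" "")
  let sorted_cases := PySem.List.sorted sorted_cases (fun case => (PySem.Dict.mk case).getD "street_name" "")
  let distinct_addresses := PySem.Set.ofList (sorted_cases.map (fun case =>
      ((PySem.Dict.mk case).get? "street_name", (PySem.Dict.mk case).get? "street_number")))
  let cutoff_index := length_target + (sorted_cases.length : Int) - PySem.Set.len distinct_addresses
  PySem.List.slice sorted_cases none (some cutoff_index)

-- ===== PRECONDITION & SPEC =====
-- Pre_ excludes exactly the inputs on which Python's sorted raises TypeError (a None sort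
-- key gets compared): two or more cases while some case misses 'street_name' or
-- 'street_number'.  A returns on none of those inputs.
def Pre_shorten_if_necessary (cases : List (List (String × String))) (length_target : Int) : Prop :=
  cases.length ≤ 1 ∨ ∀ c ∈ cases, ((PySem.Dict.mk c).contains "street_name" = true ∧ (PySem.Dict.mk c).contains "street_number" = true)
instance (cases : List (List (String × String))) (length_target : Int) : Decidable (Pre_shorten_if_necessary cases length_target) := by unfold Pre_shorten_if_necessary; infer_instance

def pvWitness_shorten_if_necessary : (List (List (String × String))) × Int :=
  ([[("street_name", "a"), ("street_number", "1")], [("street_name", "a"), ("street_number", "1")], [("street_name", "b"), ("street_number", "2")]], 2)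

def Spec_shorten_if_necessary (cases : List (List (String × String))) (length_target : Int) (out : List (List (String × String))) : Prop := out = shorten_if_necessary_alt cases length_target
instance (cases : List (List (String × String))) (length_target : Int) (out : List (List (String × String))) : Decidable (Spec_shorten_if_necessary cases length_target out) := by unfold Spec_shorten_if_necessary; infer_instance

-- ===== CLAIM (what is proved, stated in full; the proofs are below) =====
def Claim_equal_shorten_if_necessary : Prop := ∀ (cases : List (List (String × String))) (length_target : Int), Dom_shorten_if_necessary cases length_target → Pre_shorten_if_necessary cases length_target → Spec_shorten_if_necessary cases length_target (shorten_if_necessary cases length_target)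

-- ===== LEMMAS AND PROOFS =====

-- abbreviations for the two sort keys and the two address tuples
def pvName (c : List (String × String)) : String := (PySem.Dict.mk c).getD "street_name" ""
def pvNum (c : List (String × String)) : String := (PySem.Dict.mk c).getD "street_number" ""
def pvG (c : List (String × String)) : String × String := (pvName c, pvNum c)
def pvK (c : List (String × String)) : Option String × Option String :=
  ((PySem.Dict.mk c).get? "street_name", (PySem.Dict.mk c).get? "street_number")
-- the lexicographic order realised by 'sort by number, then stable-sort by name'
def pvL (a b : List (String × String)) : Prop :=
  pvName a < pvName b ∨ (pvName a = pvName b ∧ pvNum a ≤ pvNum b)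

-- number of adjacent equal pairs, A's increment total
def pvAdjCnt {β : Type} [DecidableEq β] : List β → Nat
  | [] => 0
  | [_] => 0
  | a :: b :: t => (if a = b then 1 else 0) + pvAdjCnt (b :: t)

lemma pvL_name {a b : List (String × String)} (h : pvL a b) : pvName a ≤ pvName b := by
  rcases h with h | ⟨h, _⟩
  · exact le_of_lt h
  · exact le_of_eq h

-- stability of one insertion of PySem's sort, w.r.t. the combined order pvL
lemma pvInsert_pw (x : List (String × String)) (ys : List (List (String × String)))
    (hys : ys.Pairwise pvL) (hx : ∀ y ∈ ys, ¬ pvName x < pvName y → pvL y x) :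
    (PySem.List.insertBy (fun a b => decide (pvName a < pvName b)) x ys).Pairwise pvL := by
  induction ys with
  | nil => simp [PySem.List.insertBy]
  | cons y t ih =>
    rw [List.pairwise_cons] at hys
    obtain ⟨hyt, htpw⟩ := hys
    by_cases hb : pvName x < pvName y
    · have : PySem.List.insertBy (fun a b => decide (pvName a < pvName b)) x (y :: t) = x :: y :: t := by
        simp [PySem.List.insertBy, hb]
      rw [this, List.pairwise_cons]
      refine ⟨?_, by rw [List.pairwise_cons]; exact ⟨hyt, htpw⟩⟩
      intro z hz
      rcases List.mem_cons.1 hz with rfl | hz'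
      · exact Or.inl hb
      · exact Or.inl (lt_of_lt_of_le hb (pvL_name (hyt z hz')))
    · have : PySem.List.insertBy (fun a b => decide (pvName a < pvName b)) x (y :: t)
          = y :: PySem.List.insertBy (fun a b => decide (pvName a < pvName b)) x t := by
        simp [PySem.List.insertBy, hb]
      rw [this, List.pairwise_cons]
      constructor
      · intro w hw
        rcases (PySem.List.mem_insertBy _ x w t).1 hw with rfl | hw'
        · exact hx y (List.mem_cons_self) hb
        · exact hyt w hw'
      · exact ih htpw (fun z hz hnz => hx z (List.mem_cons_of_mem _ hz) hnz)

-- the second (stable) sort of a pvNum-sorted list is pvL-sorted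
lemma pvFold_pw : ∀ (l acc : List (List (String × String))),
    acc.Pairwise pvL → (∀ y ∈ acc, ∀ x ∈ l, pvNum y ≤ pvNum x) →
    l.Pairwise (fun a b => pvNum a ≤ pvNum b) →
    (l.foldl (fun acc x => PySem.List.insertBy (fun a b => decide (pvName a < pvName b)) x acc) acc).Pairwise pvL := by
  intro l
  induction l with
  | nil => intro acc h _ _; simpa using h
  | cons x t ih =>
    intro acc hacc hinv hl
    rw [List.pairwise_cons] at hl
    obtain ⟨hxt, htpw⟩ := hl
    simp only [List.foldl_cons]
    apply ih
    · apply pvInsert_pw x acc hacc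
      intro y hy hnlt
      have hle : pvName y ≤ pvName x := le_of_not_gt hnlt
      rcases lt_or_eq_of_le hle with h | h
      · exact Or.inl h
      · exact Or.inr ⟨h, hinv y hy x List.mem_cons_self⟩
    · intro y hy z hz
      rcases (PySem.List.mem_insertBy _ x y acc).1 hy with rfl | hy'
      · exact hxt z hz
      · exact hinv y hy' z (List.mem_cons_of_mem _ hz)
    · exact htpw

lemma pvSorted_pw (cases : List (List (String × String))) :
    (PySem.List.sorted (PySem.List.sorted cases pvNum) pvName).Pairwise pvL := by
  rw [PySem.List.sorted_eq_foldl_insertBy]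
  exact pvFold_pw _ [] (by simp) (by simp) (PySem.List.sorted_pairwise cases pvNum)

lemma pvOfList_cons_cons_self {β : Type} [BEq β] [LawfulBEq β] (a : β) (r : List β) :
    PySem.Set.ofList (a :: a :: r) = PySem.Set.ofList (a :: r) := by
  rw [PySem.Set.ofList_cons (a) (a :: r), PySem.Set.ofList_cons a r]
  simp [PySem.Set.discard, List.filter_filter]

lemma pvOfList_cons_not_mem {β : Type} [BEq β] [LawfulBEq β] {a : β} {r : List β} (h : a ∉ r) :
    PySem.Set.ofList (a :: r) = a :: PySem.Set.ofList r := by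
  rw [PySem.Set.ofList_cons]
  congr 1
  rw [PySem.Set.discard, List.filter_eq_self]
  intro y hy
  have : y ∈ r := (PySem.Set.mem_ofList r y).1 hy
  simp
  rintro rfl; exact h this

-- on a pvL-sorted list, adjacent duplicates = length - number of distinct address tuples
lemma pvCount : ∀ (l : List (List (String × String))), l.Pairwise pvL →
    (∀ x ∈ l, ∀ y ∈ l, (pvK x = pvK y ↔ pvG x = pvG y)) →
    (pvAdjCnt (l.map pvK) : Int) + ((PySem.Set.ofList (l.map pvK)).length : Int) = l.length := by
  intro l
  induction l with
  | nil => intro _ _; simp [pvAdjCnt, PySem.Set.ofList]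
  | cons x t ih =>
    intro hpw hK
    cases t with
    | nil => simp [pvAdjCnt, PySem.Set.ofList, PySem.Set.add, PySem.Set.empty]
    | cons y t' =>
      rw [List.pairwise_cons] at hpw
      obtain ⟨hxall, hpw'⟩ := hpw
      have ih' := ih hpw' (fun a ha b hb => hK a (List.mem_cons_of_mem _ ha) b (List.mem_cons_of_mem _ hb))
      by_cases heq : pvK x = pvK y
      · have hset : PySem.Set.ofList ((x :: y :: t').map pvK) = PySem.Set.ofList ((y :: t').map pvK) := by
          simp only [List.map_cons, heq]
          exact pvOfList_cons_cons_self (pvK y) (t'.map pvK)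
        have hadj : pvAdjCnt ((x :: y :: t').map pvK) = 1 + pvAdjCnt ((y :: t').map pvK) := by
          simp [pvAdjCnt, heq]
        rw [hset, hadj]
        simp only [List.length_cons] at ih' ⊢
        push_cast at ih' ⊢
        omega
      · have hgxy : ¬ pvG x = pvG y := fun h => heq ((hK x List.mem_cons_self y (by simp)).2 h)
        have hnot : pvK x ∉ (y :: t').map pvK := by
          intro hmem
          rcases List.mem_map.1 hmem with ⟨z, hz, hzx⟩
          have hGzx : pvG z = pvG x := (hK z (List.mem_cons_of_mem _ hz) x List.mem_cons_self).1 hzx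
          have hzG : pvName z = pvName x ∧ pvNum z = pvNum x :=
            ⟨congrArg Prod.fst hGzx, congrArg Prod.snd hGzx⟩
          rcases List.mem_cons.1 hz with rfl | hz'
          · exact hgxy hGzx.symm
          · have hLyz : pvL y z := (List.pairwise_cons.1 hpw').1 z hz'
            have hLxy : pvL x y := hxall y (by simp)
            have h1 : pvName x ≤ pvName y := pvL_name hLxy
            have h2 : pvName y ≤ pvName z := pvL_name hLyz
            rw [hzG.1] at h2
            have hnames : pvName x = pvName y := le_antisymm h1 h2
            rcases hLxy with hlt | ⟨_, hnum1⟩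
            · rw [hnames] at hlt; exact absurd hlt (lt_irrefl _)
            rcases hLyz with hlt | ⟨_, hnum2⟩
            · rw [hzG.1, ← hnames] at hlt; exact absurd hlt (lt_irrefl _)
            rw [hzG.2] at hnum2
            exact hgxy (by simp [pvG, hnames, le_antisymm hnum1 hnum2])
        have hset : PySem.Set.ofList ((x :: y :: t').map pvK) = pvK x :: PySem.Set.ofList ((y :: t').map pvK) := by
          rw [List.map_cons]
          exact pvOfList_cons_not_mem hnot
        have hadj : pvAdjCnt ((x :: y :: t').map pvK) = pvAdjCnt ((y :: t').map pvK) := by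
          simp [pvAdjCnt, heq]
        rw [hset, hadj]
        simp only [List.length_cons] at ih' ⊢
        push_cast at ih' ⊢
        omega

-- A's enumerate loop, from index j on the suffix t of l, adds pvAdjCnt of the suffix
lemma pvLoop_aux (l : List (List (String × String))) :
    ∀ (t : List (List (String × String))) (j : Nat) (c : Int), List.drop j l = t →
    (PySem.List.enumerate t (j : Int)).foldl (fun cutoff_index ic =>
      if ic.1 + 1 = (l.length : Int) then cutoff_index
      else
        let next_case := PySem.List.pyGetD l (ic.1 + 1) []
        let same_street := (PySem.Dict.mk ic.2).get? "street_name" == (PySem.Dict.mk next_case).get? "street_name"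
        let same_number := (PySem.Dict.mk ic.2).get? "street_number" == (PySem.Dict.mk next_case).get? "street_number"
        if same_street && same_number then cutoff_index + 1 else cutoff_index) c
    = c + (pvAdjCnt (t.map pvK) : Int) := by
  intro t
  induction t with
  | nil => intro j c _; simp [PySem.List.enumerate_nil, pvAdjCnt]
  | cons x t' ih =>
    intro j c hdrop
    have hjlt : j < l.length := by
      by_contra hge
      have : List.drop j l = [] := List.drop_eq_nil_of_le (le_of_not_gt hge)
      rw [hdrop] at this; exact (List.cons_ne_nil _ _) this
    have hdrop' : List.drop (j+1) l = t' := by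
      rw [List.drop_add_one_eq_tail_drop, hdrop]; rfl
    have hlen : l.length = j + 1 + t'.length := by
      have := congrArg List.length hdrop
      simp [List.length_drop] at this
      omega
    rw [PySem.List.enumerate_cons, List.foldl_cons]
    by_cases hbr : (j : Int) + 1 = (l.length : Int)
    · have hl1 : l.length = j + 1 := by exact_mod_cast hbr.symm
      have ht' : t' = [] := by
        have : t'.length = 0 := by omega
        exact List.eq_nil_of_length_eq_zero this
      subst ht'
      rw [if_pos hbr]
      simp [PySem.List.enumerate_nil, pvAdjCnt]
    · have hjl1 : j + 1 < l.length := by omega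
      obtain ⟨y, t'', rfl⟩ : ∃ y t'', t' = y :: t'' := by
        cases t' with
        | nil => exfalso; simp at hlen; omega
        | cons a b => exact ⟨a, b, rfl⟩
      have hy : l[j+1]'hjl1 = y := by
        have h0 : (List.drop (j+1) l)[0]'(by simp [hdrop']) = y := by simp [hdrop']
        rw [List.getElem_drop] at h0
        simpa using h0
      have hnext : PySem.List.pyGetD l ((j : Int) + 1) [] = y := by
        have h0 : (0:Int) ≤ (j:Int) + 1 := by omega
        have h1 : (j:Int) + 1 < (l.length : Int) := by exact_mod_cast hjl1
        rw [PySem.List.pyGetD_eq_getElem l [] h0 h1]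
        have ht : ((j:Int)+1).toNat = j + 1 := by omega
        simp only [ht]
        exact hy
      rw [if_neg hbr]
      rw [show ((j:Int) + 1) = ((j+1 : Nat) : Int) by push_cast; ring]
      rw [ih (j+1) _ hdrop']
      have hnext2 : PySem.List.pyGetD l ((j+1 : Nat) : Int) [] = y := by
        rw [show ((j+1 : Nat) : Int) = (j:Int)+1 by push_cast; ring]; exact hnext
      simp only [hnext2]
      have hcond : (((PySem.Dict.mk x).get? "street_name" == (PySem.Dict.mk y).get? "street_name") &&
          ((PySem.Dict.mk x).get? "street_number" == (PySem.Dict.mk y).get? "street_number")) = true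
          ↔ pvK x = pvK y := by
        simp [pvK, Prod.ext_iff]
      by_cases hk : pvK x = pvK y
      · rw [if_pos (hcond.2 hk)]
        simp [pvAdjCnt, hk]
        ring
      · rw [if_neg (fun h => hk (hcond.1 h))]
        simp [pvAdjCnt, hk]

-- a contained key is retrieved: get? returns exactly the getD value
lemma pvGet_of_contains {c : List (String × String)} {k : String}
    (h : (PySem.Dict.mk c).contains k = true) :
    (PySem.Dict.mk c).get? k = some ((PySem.Dict.mk c).getD k "") := by
  induction c with
  | nil => simp [PySem.Dict.contains] at h
  | cons p t ih =>
    by_cases hk : p.1 == k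
    · simp [PySem.Dict.get?, PySem.Dict.getD, hk]
    · have hstep : (PySem.Dict.mk (p :: t)).get? k = (PySem.Dict.mk t).get? k := by
        simp [PySem.Dict.get?, hk]
      have h' : (PySem.Dict.mk t).contains k = true := by
        simp [PySem.Dict.contains] at h ⊢
        rcases h with h | h
        · exact absurd (beq_iff_eq.2 h) (by simpa using hk)
        · exact h
      rw [hstep, ih h']
      simp [PySem.Dict.getD, hstep]

-- ===== VERDICT (by name: the statement is the Claim_ definition above) =====
theorem shorten_if_necessary_spec : Claim_equal_shorten_if_necessary := by
  intro cases lt _ hpre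
  unfold Spec_shorten_if_necessary shorten_if_necessary shorten_if_necessary_alt
  show PySem.List.slice (PySem.List.sorted (PySem.List.sorted cases pvNum) pvName) none
      (some ((PySem.List.enumerate (PySem.List.sorted (PySem.List.sorted cases pvNum) pvName)).foldl
        (fun cutoff_index ic =>
          if ic.1 + 1 = ((PySem.List.sorted (PySem.List.sorted cases pvNum) pvName).length : Int) then cutoff_index
          else
            let next_case := PySem.List.pyGetD (PySem.List.sorted (PySem.List.sorted cases pvNum) pvName) (ic.1 + 1) []
            let same_street := (PySem.Dict.mk ic.2).get? "street_name" == (PySem.Dict.mk next_case).get? "street_name"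
            let same_number := (PySem.Dict.mk ic.2).get? "street_number" == (PySem.Dict.mk next_case).get? "street_number"
            if same_street && same_number then cutoff_index + 1 else cutoff_index) lt))
    = PySem.List.slice (PySem.List.sorted (PySem.List.sorted cases pvNum) pvName) none
      (some (lt + ((PySem.List.sorted (PySem.List.sorted cases pvNum) pvName).length : Int)
        - PySem.Set.len (PySem.Set.ofList ((PySem.List.sorted (PySem.List.sorted cases pvNum) pvName).map pvK))))
  set L := PySem.List.sorted (PySem.List.sorted cases pvNum) pvName with hL
  congr 2
  -- A's cutoff via the loop lemma
  have hA := pvLoop_aux L L 0 lt (by simp)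
  rw [Nat.cast_zero] at hA
  rw [hA]
  -- the key-agreement hypothesis of pvCount, from Pre_
  have hK : ∀ x ∈ L, ∀ y ∈ L, (pvK x = pvK y ↔ pvG x = pvG y) := by
    rcases hpre with hlen | hall
    · have hLlen : L.length ≤ 1 := by
        rw [hL, PySem.List.length_sorted, PySem.List.length_sorted]; exact hlen
      intro x hx y hy
      cases hcase : L with
      | nil => rw [hcase] at hx; simp at hx
      | cons a t =>
        have : t = [] := by
          rw [hcase] at hLlen; simp at hLlen
          exact hLlen
        subst this
        rw [hcase] at hx hy
        simp at hx hy
        subst hx; subst hy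
        exact iff_of_true rfl rfl
    · intro x hx y hy
      have hx' : x ∈ cases := by
        rw [hL] at hx
        exact (PySem.List.mem_sorted _ _ _ _).1 ((PySem.List.mem_sorted _ _ _ _).1 hx)
      have hy' : y ∈ cases := by
        rw [hL] at hy
        exact (PySem.List.mem_sorted _ _ _ _).1 ((PySem.List.mem_sorted _ _ _ _).1 hy)
      have hx1 := pvGet_of_contains (hall x hx').1
      have hx2 := pvGet_of_contains (hall x hx').2
      have hy1 := pvGet_of_contains (hall y hy').1
      have hy2 := pvGet_of_contains (hall y hy').2
      simp [pvK, pvG, pvName, pvNum, hx1, hx2, hy1, hy2, Prod.ext_iff]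
  have hC := pvCount L (hL ▸ pvSorted_pw cases) hK
  rw [PySem.Set.len]
  omega
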